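-- pv_equiv track=rewrite | github.com/FlaviusMiron/Rc6CipherDecipherInterface | rc6.py | convert_to_block
-- ===== SOURCE A (Python) =====
-- def convert_to_block(sentence):
--     result = []
--     aux = ""
--     for i in range(0,len(sentence)):
--         if i != 0 and i%4 == 0:
--             result.append(aux)
--             aux = ""
--         temp = bin(ord(sentence[i]))[2:]
--         if len(temp) < 8:
--             temp = "0"*(8- len(temp)) + temp
--         aux = aux + temp
--
--     result.append(aux)
--     return result
-- ===== SOURCE B (Python) =====
-- def convert_to_block(sentence):
--     binaries = [format(ord(c), '08b') for c in sentence]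
--     blocks = []
--     i = 0
--     n = len(binaries)
--     while i < n:
--         blocks.append(''.join(binaries[i:i+4]))
--         i += 4
--     return blocks
-- ===== Notes on version B (the rewrite author's own statement) =====
-- stated objective: simpler
-- what changed: A's single index loop that interleaves encoding, modulo-4 flushing and a trailing append is split into two plain passes: encode every char to its zero-padded 8-bit binary string, then chunk the list into groups of four and join each.
-- intended difference: On the empty string A returns [''] (the unconditional trailing append of the never-filled accumulator), while B returns [], the natural empty list of blocks and the intended value. — e.g. on convert_to_block(""): A returns [""], B returns []
import Mathlib
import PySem

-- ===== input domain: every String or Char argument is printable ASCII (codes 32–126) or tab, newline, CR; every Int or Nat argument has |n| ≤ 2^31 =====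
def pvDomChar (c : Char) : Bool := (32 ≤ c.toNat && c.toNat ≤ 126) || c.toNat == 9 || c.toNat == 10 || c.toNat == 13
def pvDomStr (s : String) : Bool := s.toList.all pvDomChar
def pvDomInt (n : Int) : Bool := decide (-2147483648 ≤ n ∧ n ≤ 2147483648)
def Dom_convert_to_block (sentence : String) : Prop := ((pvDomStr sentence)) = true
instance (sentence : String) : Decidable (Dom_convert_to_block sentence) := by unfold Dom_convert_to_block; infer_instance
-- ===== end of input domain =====

-- B splits A's single interleaved index loop into two passes (encode every char to 8 bits,
-- then chunk into groups of four); B returns [] on the empty string where A returns [""].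

-- bin(n)[2:] as a list of chars ('0' for n = 0); shared numeric helper of both ports
def binCore (n : Nat) : List Char :=
  if h : n = 0 then [] else binCore (n / 2) ++ [if n % 2 = 1 then '1' else '0']
decreasing_by exact Nat.div_lt_self (Nat.pos_of_ne_zero h) one_lt_two

def binChars (n : Nat) : List Char := if n = 0 then ['0'] else binCore n

-- ===== PORT A =====
-- temp = bin(ord(c))[2:]; if len(temp) < 8: temp = "0"*(8-len(temp)) + temp
def padA (c : Char) : List Char :=
  let temp := binChars c.toNat
  if temp.length < 8 then List.replicate (8 - temp.length) '0' ++ temp else temp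

-- A's for-loop over i in range(0, len(sentence)), state (result, aux); strings carried as List Char
def loopA : List Char → Nat → List (List Char) → List Char → List (List Char)
  | [], _, result, aux => result ++ [aux]
  | c :: cs, i, result, aux =>
    if i ≠ 0 ∧ i % 4 = 0 then loopA cs (i + 1) (result ++ [aux]) ([] ++ padA c)
    else loopA cs (i + 1) result (aux ++ padA c)

def convert_to_block (sentence : String) : List String :=
  (loopA sentence.toList 0 [] []).map String.ofList

-- ===== PORT B =====
-- format(ord(c), '08b')
def format8 (c : Char) : List Char :=
  let t := binChars c.toNat
  List.replicate (8 - t.length) '0' ++ t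

-- while i < n: blocks.append(''.join(binaries[i:i+4])); i += 4 — carried here as a recursion on
-- the remaining suffix binaries[i:]: emit the join of its first 4 elements, recurse on the rest
-- (fuel = initial length only makes the recursion structural; it never runs out)
def chunk4 : Nat → List (List Char) → List (List Char)
  | _, [] => []
  | 0, _ :: _ => []
  | fuel + 1, x :: xs => ((x :: xs).take 4).foldl (· ++ ·) [] :: chunk4 fuel ((x :: xs).drop 4)

def convert_to_block_alt (sentence : String) : List String :=
  let binaries := sentence.toList.map format8
  (chunk4 binaries.length binaries).map String.ofList

-- ===== PRECONDITION & SPEC =====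
-- On the empty string A returns [""] — the unconditional trailing append of the never-filled
-- accumulator; B returns [], the natural empty list of blocks, which is the intended value.
def D_convert_to_block (sentence : String) : Prop := sentence = ""
instance (sentence : String) : Decidable (D_convert_to_block sentence) := by
  unfold D_convert_to_block; infer_instance

def Spec_convert_to_block (sentence : String) (out : List String) : Prop :=
  ¬ D_convert_to_block sentence → out = convert_to_block_alt sentence
instance (sentence : String) (out : List String) : Decidable (Spec_convert_to_block sentence out) := by
  unfold Spec_convert_to_block; infer_instance

def pvDiffWitness_convert_to_block : String := ""
def pvDiffWitnessOut_convert_to_block : (List String) × (List String) := ([""], [])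

-- ===== CLAIM (what is proved, stated in full; the proofs are below) =====
def Claim_unchanged_convert_to_block : Prop := ∀ (sentence : String), Dom_convert_to_block sentence → Spec_convert_to_block sentence (convert_to_block sentence)
def Claim_changed_convert_to_block : Prop := Dom_convert_to_block (pvDiffWitness_convert_to_block) ∧ D_convert_to_block (pvDiffWitness_convert_to_block) ∧ convert_to_block (pvDiffWitness_convert_to_block) = pvDiffWitnessOut_convert_to_block.1 ∧ convert_to_block_alt (pvDiffWitness_convert_to_block) = pvDiffWitnessOut_convert_to_block.2 ∧ pvDiffWitnessOut_convert_to_block.1 ≠ pvDiffWitnessOut_convert_to_block.2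
def Claim_exact_convert_to_block : Prop := ∀ (sentence : String), Dom_convert_to_block sentence → D_convert_to_block sentence → convert_to_block sentence ≠ convert_to_block_alt sentence

-- ===== LEMMAS AND PROOFS =====

theorem padA_eq_format8 (c : Char) : padA c = format8 c := by
  by_cases h : (binChars c.toNat).length < 8
  · simp [padA, format8, h]
  · simp [padA, format8, h, Nat.sub_eq_zero_of_le (Nat.le_of_not_lt h)]

theorem chunk4_nilL (n : Nat) : chunk4 n [] = [] := by cases n <;> rfl

theorem chunk4_fuel (m : Nat) : ∀ (n : Nat) (l : List (List Char)),
    l.length ≤ m → l.length ≤ n → chunk4 m l = chunk4 n l := by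
  induction m with
  | zero =>
    intro n l hm _
    have : l = [] := List.length_eq_zero_iff.mp (Nat.le_zero.mp hm)
    subst this; simp [chunk4_nilL]
  | succ m ih =>
    intro n l hm hn
    match l, n with
    | [], _ => simp [chunk4_nilL]
    | x :: xs, 0 => simp at hn
    | x :: xs, n + 1 =>
      simp only [chunk4]
      congr 1
      exact ih n _ (by simp at hm ⊢; omega) (by simp at hn ⊢; omega)

-- proof-side wrapper: chunk4 run with exactly enough fuel
def chunkRun (l : List (List Char)) : List (List Char) := chunk4 l.length l

theorem chunkRun_cons (x : List Char) (xs : List (List Char)) :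
    chunkRun (x :: xs) =
      ((x :: xs).take 4).foldl (· ++ ·) [] :: chunkRun ((x :: xs).drop 4) := by
  unfold chunkRun
  show chunk4 (xs.length + 1) (x :: xs) = _
  simp only [chunk4]
  congr 1
  exact chunk4_fuel xs.length _ _ (by simp) (by simp)

-- main invariant: mid-group state of A's loop vs B's chunking;
-- ps are the pads already appended to aux in the current group
theorem loopA_chunk (cs : List Char) : ∀ (ps r : List (List Char)) (i : Nat),
    1 ≤ ps.length → ps.length ≤ 4 → i % 4 = ps.length % 4 → i ≠ 0 →
    loopA cs i r (ps.foldl (· ++ ·) []) = r ++ chunkRun (ps ++ cs.map padA) := by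
  induction cs with
  | nil =>
    intro ps r i h1 h4 _ _
    match ps, h1 with
    | p :: ps', _ =>
      simp only [loopA, List.map_nil, List.append_nil, chunkRun_cons]
      rw [List.take_of_length_le (by simpa using h4),
        List.drop_eq_nil_of_le (by simpa using h4), chunkRun]
      simp [chunk4_nilL]
  | cons c cs ih =>
    intro ps r i h1 h4 hmod hi
    by_cases hfour : ps.length = 4
    · have hi4 : i % 4 = 0 := by omega
      simp only [loopA]
      rw [if_pos (show i ≠ 0 ∧ i % 4 = 0 from ⟨hi, hi4⟩)]
      rw [show ([] ++ padA c : List Char) = ([padA c].foldl (· ++ ·) []) by simp]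
      rw [ih [padA c] (r ++ [ps.foldl (· ++ ·) []]) (i + 1) (by simp) (by simp)
          (by simp only [List.length_cons, List.length_nil]; omega) (by omega)]
      match ps, hfour with
      | [p1, p2, p3, p4], _ =>
        rw [show ([p1, p2, p3, p4] ++ (c :: cs).map padA)
              = p1 :: (p2 :: p3 :: p4 :: padA c :: cs.map padA) by simp]
        rw [chunkRun_cons]
        simp
    · have : ¬ (i ≠ 0 ∧ i % 4 = 0) := by omega
      simp only [loopA]
      rw [if_neg this]
      rw [show ps.foldl (· ++ ·) [] ++ padA c = ((ps ++ [padA c]).foldl (· ++ ·) []) by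
        simp [List.foldl_append]]
      rw [ih (ps ++ [padA c]) r (i + 1) (by simp) (by simp; omega)
          (by simp only [List.length_append, List.length_cons, List.length_nil]; omega)
          (by omega)]
      simp

theorem convert_eq_of_ne_nil (c : Char) (cs : List Char) (s : String)
    (h : s.toList = c :: cs) : convert_to_block s = convert_to_block_alt s := by
  unfold convert_to_block convert_to_block_alt
  rw [h]
  simp only [loopA]
  rw [if_neg (by simp)]
  rw [show ([] ++ padA c : List Char) = ([padA c].foldl (· ++ ·) []) by simp]
  rw [loopA_chunk cs [padA c] [] 1 (by simp) (by simp)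
      (by simp only [List.length_cons, List.length_nil]) (by omega)]
  have hmap : cs.map padA = cs.map format8 := List.map_congr_left (fun x _ => padA_eq_format8 x)
  simp only [List.nil_append, List.map_cons, padA_eq_format8, hmap]
  rfl

-- ===== VERDICT (by name: the statement is the Claim_ definition above) =====
theorem convert_to_block_spec : Claim_unchanged_convert_to_block := by
  intro s _ hD
  have hne : s.toList ≠ [] := by
    intro h0
    exact hD (by
      unfold D_convert_to_block
      have := congrArg String.ofList h0
      simpa using this)
  match hcs : s.toList, hne with
  | c :: cs, _ => exact convert_eq_of_ne_nil c cs s hcs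

theorem convert_to_block_changed : Claim_changed_convert_to_block := by
  unfold Claim_changed_convert_to_block; decide

theorem convert_to_block_tight : Claim_exact_convert_to_block := by
  intro s _ hD
  unfold D_convert_to_block at hD
  subst hD; decide
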